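-- pv_equiv track=rewrite | github.com/aditya-kd/toolbox | work_aditya/CollegeHackerrank/container_of_balls.py | solve
-- ===== SOURCE A (Python) =====
-- def solve(container):
--     rows=len(container)
--     cols=len(container[0])
--     cont=[0]*rows
--     type=[0]*cols
--
--     for i in range(rows):
--         cont[i]= sum(container[i])
--     for j in range(cols):
--         ss=0
--         for i in range(rows):
--             ss+= container[i][j]
--         type[j]=ss
--
--     if sorted(type)==sorted(cont):
--         return 'Possible'
--     else:
--         return 'Impossible'
-- ===== SOURCE B (Python) =====
-- def solve(container):
--     # one interleaved pass: accumulate column sums by vector addition while collecting row sums,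
--     # then decide multiset equality by cancellation (remove each row sum from the column-sum pool)
--     col = [0] * len(container[0])
--     row_sums = []
--     for row in container:
--         row_sums.append(sum(row))
--         col = [c + v for c, v in zip(col, row)]
--     for s in row_sums:
--         if s in col:
--             col.remove(s)
--         else:
--             return 'Impossible'
--     return 'Possible' if not col else 'Impossible'
-- ===== Notes on version B (the rewrite author's own statement) =====
-- stated objective: alternative
-- what changed: B makes one interleaved pass over the rows, building the column-sum vector by elementwise zip-addition while collecting row sums, and decides multiset equality by cancellation (removing each row sum from the column-sum pool) instead of A's two separate index-nested passes followed by sorting both lists and comparing.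
import Mathlib
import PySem

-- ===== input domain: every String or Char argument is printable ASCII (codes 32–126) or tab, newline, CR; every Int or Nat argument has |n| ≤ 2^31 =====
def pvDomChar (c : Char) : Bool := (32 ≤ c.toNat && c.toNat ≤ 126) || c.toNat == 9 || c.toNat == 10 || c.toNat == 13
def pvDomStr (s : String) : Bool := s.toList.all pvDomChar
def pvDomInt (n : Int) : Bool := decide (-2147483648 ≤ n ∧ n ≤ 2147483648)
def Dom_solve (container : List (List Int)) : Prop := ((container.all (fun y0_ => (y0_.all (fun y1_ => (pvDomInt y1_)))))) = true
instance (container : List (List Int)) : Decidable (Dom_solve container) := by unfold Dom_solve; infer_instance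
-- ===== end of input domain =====

-- B makes one interleaved pass (column sums by elementwise zip-addition while collecting row sums)
-- and decides multiset equality by cancellation, removing each row sum from the column-sum pool,
-- instead of A's two index-nested passes followed by sort-and-compare; same result on Pre_.

-- ===== PORT A =====
def solve (container : List (List Int)) : String :=
  let rows : Int := (container.length : Int)
  let cols : Int := ((PySem.List.pyGetD container 0 []).length : Int)  -- container[0]; IndexError on [] is outside Pre_
  let cont := (PySem.List.pyRange 0 rows 1).map (fun i => (PySem.List.pyGetD container i []).sum)
  let type := (PySem.List.pyRange 0 cols 1).map (fun j =>
      (PySem.List.pyRange 0 rows 1).foldl (fun ss i =>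
        ss + PySem.List.pyGetD (PySem.List.pyGetD container i []) j 0) 0)  -- container[i][j]; out of range only outside Pre_
  if PySem.List.sorted type (fun x => x) false = PySem.List.sorted cont (fun x => x) false
  then "Possible" else "Impossible"

-- ===== PORT B =====
-- cancellation loop: for each row sum, remove a matching column sum; at the end the pool must be empty
def pvCancel : List Int → List Int → String
  | [], col => if col.isEmpty then "Possible" else "Impossible"
  | s :: rest, col => if s ∈ col then pvCancel rest (col.erase s) else "Impossible"

def solve_alt (container : List (List Int)) : String :=
  let init : List Int := List.replicate (PySem.List.pyGetD container 0 []).length 0  -- [0]*len(container[0]); [] outside Pre_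
  let fin := container.foldl
      (fun st row => (st.1 ++ [row.sum], List.zipWith (· + ·) st.2 row))
      (([] : List Int), init)
  pvCancel fin.1 fin.2

-- ===== PRECONDITION & SPEC =====
-- exactly where A returns: a nonempty container none of whose rows is shorter than row 0
def Pre_solve (container : List (List Int)) : Prop :=
  container ≠ [] ∧ ∀ r ∈ container, (container.headD []).length ≤ r.length
instance (container : List (List Int)) : Decidable (Pre_solve container) := by unfold Pre_solve; infer_instance
def pvWitness_solve : List (List Int) := [[1, 2], [2, 1]]

def Spec_solve (container : List (List Int)) (out : String) : Prop := out = solve_alt container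
instance (container : List (List Int)) (out : String) : Decidable (Spec_solve container out) := by unfold Spec_solve; infer_instance

-- ===== CLAIM (what is proved, stated in full; the proofs are below) =====
def Claim_equal_solve : Prop := ∀ (container : List (List Int)), Dom_solve container → Pre_solve container → Spec_solve container (solve container)

-- ===== LEMMAS AND PROOFS =====

-- the cancellation loop decides multiset equality
theorem pvCancel_eq (xs ys : List Int) :
    pvCancel xs ys = if xs.Perm ys then "Possible" else "Impossible" := by
  induction xs generalizing ys with
  | nil =>
    rw [pvCancel]
    by_cases h : ys = [] <;> simp [h, List.isEmpty_iff]
  | cons s rest ih =>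
    rw [pvCancel]
    by_cases h : s ∈ ys
    · rw [if_pos h, ih]
      by_cases hp : rest.Perm (ys.erase s)
      · rw [if_pos hp, if_pos (List.cons_perm_iff_perm_erase.mpr ⟨h, hp⟩)]
      · rw [if_neg hp, if_neg (fun hc => hp (List.cons_perm_iff_perm_erase.mp hc).2)]
    · rw [if_neg h, if_neg (fun hc => h (hc.mem_iff.mp List.mem_cons_self))]

theorem pv_foldl_fst (l : List (List Int)) (acc c : List Int) :
    (l.foldl (fun st row => (st.1 ++ [row.sum], List.zipWith (· + ·) st.2 row)) (acc, c)).1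
      = acc ++ l.map (fun row => row.sum) := by
  induction l generalizing acc c with
  | nil => simp
  | cons r rs ih => simp [List.foldl_cons, ih]

theorem pv_foldl_snd (l : List (List Int)) (acc c : List Int) :
    (l.foldl (fun st row => (st.1 ++ [row.sum], List.zipWith (· + ·) st.2 row)) (acc, c)).2
      = l.foldl (fun cc row => List.zipWith (· + ·) cc row) c := by
  induction l generalizing acc c with
  | nil => rfl
  | cons r rs ih => simp [List.foldl_cons, ih]

-- the zip-addition fold computes, per column index, the sum of the entries at that index
theorem pv_zfold (l : List (List Int)) (c : List Int)
    (h : ∀ r ∈ l, c.length ≤ r.length) :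
    l.foldl (fun cc row => List.zipWith (· + ·) cc row) c
      = (List.range c.length).map
          (fun j => c.getD j 0 + (l.map (fun r => r.getD j 0)).sum) := by
  induction l generalizing c with
  | nil =>
    simp only [List.foldl_nil, List.map_nil, List.sum_nil, add_zero]
    refine List.ext_getElem (by simp) ?_
    intro j h1 h2
    simp [List.getD_eq_getElem?_getD, List.getElem?_eq_getElem h1]
  | cons r rs ih =>
    have hr : c.length ≤ r.length := h r List.mem_cons_self
    have hlen : (List.zipWith (· + ·) c r).length = c.length := by
      rw [List.length_zipWith]; omega
    rw [List.foldl_cons, ih _ (by intro t ht; rw [hlen]; exact h t (List.mem_cons_of_mem _ ht)),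
        hlen]
    refine List.map_congr_left ?_
    intro j hj
    rw [List.mem_range] at hj
    have hz : (List.zipWith (· + ·) c r).getD j 0 = c.getD j 0 + r.getD j 0 := by
      rw [List.getD_eq_getElem _ _ (hlen ▸ hj), List.getElem_zipWith,
          List.getD_eq_getElem _ _ hj, List.getD_eq_getElem _ _ (lt_of_lt_of_le hj hr)]
    rw [hz, List.map_cons, List.sum_cons, add_assoc]

theorem pv_foldl_add (l : List (List Int)) (f : List Int → Int) (init : Int) :
    l.foldl (fun ss row => ss + f row) init = init + (l.map f).sum := by
  induction l generalizing init with
  | nil => simp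
  | cons r rs ih => simp [ih]; ring

theorem pv_main (container : List (List Int)) (hne : container ≠ [])
    (hrow : ∀ r ∈ container, (container.headD []).length ≤ r.length) :
    solve container = solve_alt container := by
  obtain ⟨r0, rs, rfl⟩ : ∃ a b, container = a :: b := by
    cases container with
    | nil => exact absurd rfl hne
    | cons a b => exact ⟨a, b, rfl⟩
  simp only [List.headD_cons] at hrow
  rw [solve, solve_alt]
  -- A's row sums are the map of sums
  have hcont : (PySem.List.pyRange 0 ((r0 :: rs).length : Int) 1).map
        (fun i => (PySem.List.pyGetD (r0 :: rs) i []).sum)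
      = (r0 :: rs).map (fun row => row.sum) := by
    have := PySem.List.map_pyGetD_pyRange_zero' (r0 :: rs) []
    calc (PySem.List.pyRange 0 ((r0 :: rs).length : Int) 1).map
            (fun i => (PySem.List.pyGetD (r0 :: rs) i []).sum)
        = ((PySem.List.pyRange 0 ((r0 :: rs).length : Int) 1).map
            (fun i => PySem.List.pyGetD (r0 :: rs) i [])).map (fun row => row.sum) := by
          rw [List.map_map]; rfl
      _ = (r0 :: rs).map (fun row => row.sum) := by rw [this]
  -- A's column sums are, per column index, the sums of the entries at that index
  have htype : (PySem.List.pyRange 0 (((PySem.List.pyGetD (r0 :: rs) 0 []).length : Int)) 1).map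
        (fun j => (PySem.List.pyRange 0 ((r0 :: rs).length : Int) 1).foldl (fun ss i =>
          ss + PySem.List.pyGetD (PySem.List.pyGetD (r0 :: rs) i []) j 0) 0)
      = (List.range r0.length).map
          (fun j => ((r0 :: rs).map (fun r => r.getD j 0)).sum) := by
    rw [PySem.List.pyGetD_zero_cons, PySem.List.pyRange_zero_natCast r0.length, List.map_map]
    refine List.map_congr_left ?_
    intro j _
    simp only [Function.comp_def]
    rw [PySem.List.foldl_pyRange_zero_pyGetD' (r0 :: rs) []
        (fun ss row => ss + PySem.List.pyGetD row ((j : Nat) : Int) 0) 0]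
    rw [pv_foldl_add]
    simp [PySem.List.pyGetD_natCast]
  -- B's state fold yields the same two lists
  have hfst := pv_foldl_fst (r0 :: rs) [] (List.replicate (PySem.List.pyGetD (r0 :: rs) 0 []).length 0)
  have hsnd : ((r0 :: rs).foldl
        (fun st row => (st.1 ++ [row.sum], List.zipWith (· + ·) st.2 row))
        (([] : List Int), List.replicate (PySem.List.pyGetD (r0 :: rs) 0 []).length 0)).2
      = (List.range r0.length).map
          (fun j => ((r0 :: rs).map (fun r => r.getD j 0)).sum) := by
    rw [pv_foldl_snd, PySem.List.pyGetD_zero_cons,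
        pv_zfold (r0 :: rs) (List.replicate r0.length 0)
          (by intro t ht; rw [List.length_replicate]
              rcases List.mem_cons.mp ht with rfl | ht'
              · exact le_refl _
              · exact hrow t (List.mem_cons_of_mem _ ht'))]
    simp [List.length_replicate]
  rw [hcont, htype, hfst, List.nil_append, hsnd, pvCancel_eq]
  have hiff : (PySem.List.sorted
        ((List.range r0.length).map (fun j => ((r0 :: rs).map (fun r => r.getD j 0)).sum))
        (fun x => x) false
      = PySem.List.sorted ((r0 :: rs).map (fun row => row.sum)) (fun x => x) false)
      ↔ ((r0 :: rs).map (fun row => row.sum)).Perm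
          ((List.range r0.length).map (fun j => ((r0 :: rs).map (fun r => r.getD j 0)).sum)) := by
    rw [PySem.List.sorted_id_eq_sorted_id_iff_perm]
    exact ⟨List.Perm.symm, List.Perm.symm⟩
  by_cases hp : ((r0 :: rs).map (fun row => row.sum)).Perm
      ((List.range r0.length).map (fun j => ((r0 :: rs).map (fun r => r.getD j 0)).sum))
  · rw [if_pos (hiff.mpr hp), if_pos hp]
  · rw [if_neg (fun h => hp (hiff.mp h)), if_neg hp]

-- ===== VERDICT (by name: the statement is the Claim_ definition above) =====
theorem solve_spec : Claim_equal_solve := by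
  intro container _ hpre
  show solve container = solve_alt container
  exact pv_main container hpre.1 hpre.2
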